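-- pv_equiv track=rewrite | github.com/malikarslan699/aso-service-automation | app/services/pipeline_tracking.py | current_step_label
-- ===== SOURCE A (Python) =====
-- def current_step_label(step_log: list[dict], fallback: str | None = None) -> str | None:
--     running = next((step for step in step_log if step.get("status") == "running"), None)
--     if running:
--         return running.get("label")
--
--     failed = next((step for step in step_log if step.get("status") == "failed"), None)
--     if failed:
--         return failed.get("message") or failed.get("label")
--
--     completed = [step for step in step_log if step.get("status") == "completed"]
--     if completed:
--         return completed[-1].get("label")
--
--     return fallback
-- ===== SOURCE B (Python) =====
-- def current_step_label(step_log: list[dict], fallback: str | None = None) -> str | None: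
--     _MISS = object()
--     first_running = first_failed = last_completed = _MISS
--     for step in step_log:
--         status = step.get("status")
--         if status == "running":
--             if first_running is _MISS:
--                 first_running = step.get("label")
--         elif status == "failed":
--             if first_failed is _MISS:
--                 first_failed = step.get("message") or step.get("label")
--         elif status == "completed":
--             last_completed = step.get("label")
--     if first_running is not _MISS:
--         return first_running
--     if first_failed is not _MISS:
--         return first_failed
--     if last_completed is not _MISS:
--         return last_completed
--     return fallback
-- ===== Notes on version B (the rewrite author's own statement) =====
-- stated objective: alternative
-- what changed: A's two next() scans and a filter pass over step_log are replaced by a single loop maintaining first-running, first-failed and last-completed accumulators, with the priority selection done once after the loop.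
import Mathlib
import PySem

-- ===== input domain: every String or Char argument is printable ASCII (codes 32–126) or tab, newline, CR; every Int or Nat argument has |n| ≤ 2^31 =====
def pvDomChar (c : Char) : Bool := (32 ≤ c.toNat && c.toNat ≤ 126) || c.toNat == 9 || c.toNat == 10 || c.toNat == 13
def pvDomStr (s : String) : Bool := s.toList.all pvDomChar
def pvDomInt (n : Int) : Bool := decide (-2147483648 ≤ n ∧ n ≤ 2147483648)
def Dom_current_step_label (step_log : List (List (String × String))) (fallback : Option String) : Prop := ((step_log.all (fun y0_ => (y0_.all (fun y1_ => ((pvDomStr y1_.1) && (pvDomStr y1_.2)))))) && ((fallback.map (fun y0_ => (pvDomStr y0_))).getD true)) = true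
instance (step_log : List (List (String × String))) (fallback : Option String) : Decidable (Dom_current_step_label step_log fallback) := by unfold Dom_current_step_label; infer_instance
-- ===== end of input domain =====

-- B replaces A's three passes over step_log (two next() scans and a filter) by one loop
-- keeping first-running / first-failed / last-completed accumulators (objective: alternative).

-- `step.get(k)` on a step dict (given to us as its pair list, built into a dict in insertion order)
def stepGet (step : List (String × String)) (k : String) : Option String :=
  (PySem.Dict.ofList step).get? k

-- ===== PORT A =====
def current_step_label (step_log : List (List (String × String))) (fallback : Option String) : Option String :=
  match step_log.find? (fun step => stepGet step "status" == some "running") with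
  | some running => stepGet running "label"
  | none =>
    match step_log.find? (fun step => stepGet step "status" == some "failed") with
    | some failed =>
        -- failed.get("message") or failed.get("label"): Python `or` falls through on None and ""
        match stepGet failed "message" with
        | some m => if m = "" then stepGet failed "label" else some m
        | none => stepGet failed "label"
    | none =>
      let completed := step_log.filter (fun step => stepGet step "status" == some "completed")
      if completed.isEmpty then fallback
      else
        match PySem.List.pyGet? completed (-1) with
        | some last => stepGet last "label"
        | none => fallback   -- unreachable: completed is nonempty

-- ===== PORT B =====
-- failed step's value: step.get("message") or step.get("label")
def failedVal (step : List (String × String)) : Option String :=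
  match stepGet step "message" with
  | some m => if m = "" then stepGet step "label" else some m
  | none => stepGet step "label"

-- the for-loop of Source B: `none` plays the role of the _MISS sentinel
def stepLoop : List (List (String × String)) → Option (Option String) → Option (Option String) →
    Option (Option String) → Option (Option String) × Option (Option String) × Option (Option String)
  | [], r, f, c => (r, f, c)
  | step :: rest, r, f, c =>
    let s := stepGet step "status"
    if s == some "running" then
      stepLoop rest (if r.isNone then some (stepGet step "label") else r) f c
    else if s == some "failed" then
      stepLoop rest r (if f.isNone then some (failedVal step) else f) c
    else if s == some "completed" then
      stepLoop rest r f (some (stepGet step "label"))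
    else
      stepLoop rest r f c

def current_step_label_alt (step_log : List (List (String × String))) (fallback : Option String) : Option String :=
  match stepLoop step_log none none none with
  | (r, f, c) =>
    match r with
    | some v => v
    | none =>
      match f with
      | some v => v
      | none =>
        match c with
        | some v => v
        | none => fallback

-- ===== PRECONDITION & SPEC =====
def Spec_current_step_label (step_log : List (List (String × String))) (fallback : Option String) (out : Option String) : Prop := out = current_step_label_alt step_log fallback
instance (step_log : List (List (String × String))) (fallback : Option String) (out : Option String) : Decidable (Spec_current_step_label step_log fallback out) := by unfold Spec_current_step_label; infer_instance

-- ===== CLAIM (what is proved, stated in full; the proofs are below) =====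
def Claim_equal_current_step_label : Prop := ∀ (step_log : List (List (String × String))) (fallback : Option String), Dom_current_step_label step_log fallback → Spec_current_step_label step_log fallback (current_step_label step_log fallback)

-- ===== LEMMAS AND PROOFS =====

-- the loop's final accumulators, characterised through A-style scans
theorem stepLoop_eq (l : List (List (String × String)))
    (r f c : Option (Option String)) :
    stepLoop l r f c =
      (r.or ((l.find? (fun step => stepGet step "status" == some "running")).map
              (fun step => stepGet step "label")),
       f.or ((l.find? (fun step => stepGet step "status" == some "failed")).map failedVal),
       (((l.filter (fun step => stepGet step "status" == some "completed")).getLast?).map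
              (fun step => stepGet step "label")).or c) := by
  induction l generalizing r f c with
  | nil => simp [stepLoop]
  | cons step rest ih =>
    simp only [stepLoop]
    by_cases hr : stepGet step "status" == some "running"
    · have hf : ¬ (stepGet step "status" == some "failed") := by
        simp_all
      have hc : ¬ (stepGet step "status" == some "completed") := by
        simp_all
      simp only [hr, if_pos, ih, List.find?_cons, List.filter_cons, hf, hc]
      cases r <;> simp [Option.or]
    · by_cases hf : stepGet step "status" == some "failed"
      · have hc : ¬ (stepGet step "status" == some "completed") := by
          simp_all
        simp only [hr, hf, if_pos, ih, List.find?_cons, List.filter_cons, hc]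
        cases f <;> simp [Option.or]
      · by_cases hc : stepGet step "status" == some "completed"
        · simp only [hr, hf, hc, if_pos, ih, List.find?_cons, List.filter_cons]
          cases h : (rest.filter (fun step => stepGet step "status" == some "completed")).getLast? <;>
            simp [h, List.getLast?_cons, Option.or]
        · simp only [hr, hf, hc, ih, List.find?_cons, List.filter_cons]
          simp

-- ===== VERDICT (by name: the statement is the Claim_ definition above) =====
theorem current_step_label_spec : Claim_equal_current_step_label := by
  intro step_log fallback _
  unfold Spec_current_step_label current_step_label current_step_label_alt
  rw [stepLoop_eq]
  simp only [Option.or_none, Option.none_or]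
  cases hr : step_log.find? (fun step => stepGet step "status" == some "running") with
  | some running => simp
  | none =>
    simp only [Option.map_none]
    cases hf : step_log.find? (fun step => stepGet step "status" == some "failed") with
    | some failed => simp [failedVal]
    | none =>
      simp only [Option.map_none]
      cases hc : (step_log.filter (fun step => stepGet step "status" == some "completed")).getLast? with
      | none =>
        have : step_log.filter (fun step => stepGet step "status" == some "completed") = [] :=
          List.getLast?_eq_none_iff.mp hc
        simp [this]
      | some last =>
        have hne : step_log.filter (fun step => stepGet step "status" == some "completed") ≠ [] := by
          intro h; rw [h] at hc; simp at hc
        simp [List.isEmpty_iff, hne, PySem.List.pyGet?_neg_one, hc]
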